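-- pv_equiv track=rewrite | github.com/HalfHeartGuy/Jugendwettbewerb_archive | testing.py | finde_alle_zahlenpaare
-- ===== SOURCE A (Python) =====
-- def finde_alle_zahlenpaare(matrix, ziel):
--     ziel_positionen = []  # Speichert die Positionen des Zielwerts
--     andere_zahlen = {}  # Speichert die Positionen von Zahlen, die nicht das Ziel sind
--
--     # Durchlaufe die Matrix und erfasse die Positionen aller Zahlen
--     for i, zeile in enumerate(matrix):
--         for j, zahl in enumerate(zeile):
--             if zahl == ziel:
--                 ziel_positionen.append((i, j))
--             elif zahl != 0:  # Ignoriere Nullen, da sie nicht als g체ltige Zahlen betrachtet werden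
--                 if zahl in andere_zahlen:
--                     andere_zahlen[zahl].append((i, j))
--                 else:
--                     andere_zahlen[zahl] = [(i, j)]
--
--     # Wenn das Ziel nicht gefunden wurde oder es keine anderen Zahlen gibt, beende die Funktion
--     if not ziel_positionen or not andere_zahlen:
--         return None
--
--     # Berechnen der Entfernungen f체r jedes Zahlenpaar
--     paar_entfernungen = []  # Liste, die die Zahlen und ihre minimalen Entfernungen speichert
--
--     for zahl, positionen in andere_zahlen.items():
--         min_entfernung = float('inf')  # Unendlich
--         for pos in positionen:
--             for ziel_pos in ziel_positionen:
--                 # Berechne die "Entfernung" zwischen den Positionen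
--                 entfernung = abs(pos[0] - ziel_pos[0]) + abs(pos[1] - ziel_pos[1])
--                 if entfernung < min_entfernung:
--                     min_entfernung = entfernung
--
--         # Speichere die Zahl mit ihrer minimalen Entfernung
--         paar_entfernungen.append((zahl, min_entfernung))
--
--     # Sortiere die Paare basierend auf ihren Entfernungen
--     paar_entfernungen.sort(key=lambda x: x[1])
--
--     # Erstelle eine Liste der Zahlen, geordnet nach ihrer Entfernung zur Zielzahl
--     geordnete_zahlen = [paar[0] for paar in paar_entfernungen]
--
--     return geordnete_zahlen
-- ===== SOURCE B (Python) =====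
-- def _durchlauf(vorher, werte, unendlich):
--     # One 1D distance-transform sweep: neu[j] = min(werte[j], vorher[j] + 1, neu[j-1] + 1).
--     neu = []
--     links = unendlich
--     for v, o in zip(werte, vorher):
--         links = min(v, o + 1, links + 1)
--         neu.append(links)
--     return neu
--
--
-- def finde_alle_zahlenpaare(matrix, ziel):
--     # Two-pass chamfer distance transform: the minimum Manhattan distance of every
--     # cell to the nearest target cell is computed by a forward sweep (top/left
--     # neighbours) followed by a backward sweep (bottom/right neighbours), instead
--     # of scanning all target positions for every cell.
--     hoehe = len(matrix)
--     breite = max(map(len, matrix), default=0)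
--     unendlich = hoehe + breite + 1  # larger than any possible grid distance
--     gitter = [[0 if x == ziel else unendlich for x in zeile]
--               + [unendlich] * (breite - len(zeile)) for zeile in matrix]
--
--     # forward pass, top-to-bottom, left-to-right
--     zeile_oben = [unendlich] * breite
--     vorwaerts = []
--     for zeile in gitter:
--         zeile_oben = _durchlauf(zeile_oben, zeile, unendlich)
--         vorwaerts.append(zeile_oben)
--
--     # backward pass, bottom-to-top, right-to-left (same sweep on reversed data)
--     zeile_unten = [unendlich] * breite
--     rueckwaerts = []
--     for zeile in reversed(vorwaerts):
--         zeile_unten = _durchlauf(zeile_unten, zeile[::-1], unendlich)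
--         rueckwaerts.append(zeile_unten)
--     entfernung = [z[::-1] for z in reversed(rueckwaerts)]
--
--     # collect the minimum distance per number in one zipped scan
--     gefunden = False
--     beste = {}
--     for zeile, dzeile in zip(matrix, entfernung):
--         for zahl, d in zip(zeile, dzeile):
--             if zahl == ziel:
--                 gefunden = True
--             elif zahl != 0:
--                 if zahl not in beste or d < beste[zahl]:
--                     beste[zahl] = d
--     if not gefunden or not beste:
--         return None
--     return [z for z, _ in sorted(beste.items(), key=lambda p: p[1])]
-- ===== Notes on version B (the rewrite author's own statement) =====
-- stated objective: alternative
-- what changed: B computes every cell's minimum Manhattan distance to the target cells with a two-pass chamfer distance transform (forward sweep over top/left neighbours, backward sweep over bottom/right neighbours) on an R x W grid, then one zipped scan keeps a running minimum per number, instead of A's per-number position lists with a positions-times-targets distance scan; B's cost is independent of the number of target cells, A's grows with it.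
import Mathlib
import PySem

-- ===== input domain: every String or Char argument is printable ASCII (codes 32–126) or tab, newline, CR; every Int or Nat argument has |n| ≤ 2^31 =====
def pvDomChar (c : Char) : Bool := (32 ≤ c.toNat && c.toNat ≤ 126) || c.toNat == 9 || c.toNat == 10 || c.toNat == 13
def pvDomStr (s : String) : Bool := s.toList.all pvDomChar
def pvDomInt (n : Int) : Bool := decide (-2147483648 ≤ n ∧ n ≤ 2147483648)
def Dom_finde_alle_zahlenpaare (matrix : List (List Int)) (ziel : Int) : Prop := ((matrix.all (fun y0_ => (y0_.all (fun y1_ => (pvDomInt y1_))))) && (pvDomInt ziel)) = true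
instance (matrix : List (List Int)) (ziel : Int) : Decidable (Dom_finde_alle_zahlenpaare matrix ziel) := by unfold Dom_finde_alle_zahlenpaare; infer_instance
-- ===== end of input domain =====

-- B replaces A's per-number positions×targets Manhattan-distance scans by a two-pass
-- chamfer distance transform over the grid followed by one zipped scan (objective: alternative).

-- ===== PORT A =====
-- Transliteration of A. The running minimum that Python starts at float('inf') is
-- ported as Option Int with none = infinity; 'm.getD 0' extracts it, the default 0
-- being unreachable because the target list is non-empty in that branch.
def finde_alle_zahlenpaare (matrix : List (List Int)) (ziel : Int) : Option (List Int) :=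
  let st := (PySem.List.enumerate matrix 0).foldl (fun st p =>
      (PySem.List.enumerate p.2 0).foldl (fun st q =>
        if q.2 = ziel then (st.1 ++ [(p.1, q.1)], st.2)
        else if q.2 ≠ 0 then
          match st.2.get? q.2 with
          | some ps => (st.1, st.2.insert q.2 (ps ++ [(p.1, q.1)]))
          | none    => (st.1, st.2.insert q.2 [(p.1, q.1)])
        else st) st)
    (([] : List (Int × Int)), (PySem.Dict.empty : PySem.Dict Int (List (Int × Int))))
  if st.1 = [] ∨ st.2.items = [] then none
  else
    let paare := st.2.items.foldl (fun acc pz =>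
      let m := pz.2.foldl (fun m pos =>
        st.1.foldl (fun m zp =>
          let e : Int := ((pos.1 - zp.1).natAbs : Int) + ((pos.2 - zp.2).natAbs : Int)
          match m with
          | none => some e
          | some v => if e < v then some e else some v) m) (none : Option Int)
      acc ++ [(pz.1, m.getD 0)]) ([] : List (Int × Int))
    some ((PySem.List.sorted paare (fun x => x.2) false).map (fun p => p.1))

-- ===== PORT B =====
-- Transliteration of Source B's helper _durchlauf: one 1D distance-transform sweep.
def pvDurchlauf (vorher werte : List Int) (unendlich : Int) : List Int :=
  ((werte.zip vorher).foldl (fun (st : List Int × Int) vo =>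
      let links := min (min vo.1 (vo.2 + 1)) (st.2 + 1)
      (st.1 ++ [links], links)) (([] : List Int), unendlich)).1

-- Transliteration of Source B: two-pass chamfer distance transform, then one zipped scan.
-- max(map(len, matrix), default=0) is PySem.List.maxD; zeile[::-1] is
-- PySem.List.slice? … (-1), whose step -1 ≠ 0 never raises, so '.getD []' is exact.
def finde_alle_zahlenpaare_alt (matrix : List (List Int)) (ziel : Int) : Option (List Int) :=
  let hoehe : Int := PySem.List.len matrix
  let breite : Int := PySem.List.maxD (matrix.map (fun z => PySem.List.len z)) (fun x => x) 0
  let unendlich : Int := hoehe + breite + 1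
  let gitter : List (List Int) := matrix.map (fun zeile =>
    (zeile.map (fun x => if x = ziel then 0 else unendlich))
      ++ List.replicate (breite - PySem.List.len zeile).toNat unendlich)
  let fwd := gitter.foldl (fun (st : List Int × List (List Int)) zeile =>
      let z := pvDurchlauf st.1 zeile unendlich
      (z, st.2 ++ [z])) (List.replicate breite.toNat unendlich, [])
  let bwd := fwd.2.reverse.foldl (fun (st : List Int × List (List Int)) zeile =>
      let z := pvDurchlauf st.1 ((PySem.List.slice? zeile none none (-1)).getD []) unendlich
      (z, st.2 ++ [z])) (List.replicate breite.toNat unendlich, [])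
  let entfernung := bwd.2.reverse.map (fun z => (PySem.List.slice? z none none (-1)).getD [])
  let st := (matrix.zip entfernung).foldl (fun (sz : Bool × PySem.Dict Int Int) pz =>
      (pz.1.zip pz.2).foldl (fun (sq : Bool × PySem.Dict Int Int) (q : Int × Int) =>
        if q.1 = ziel then (true, sq.2)
        else if q.1 ≠ 0 then
          match sq.2.get? q.1 with
          | none => (sq.1, sq.2.insert q.1 q.2)
          | some cur => if q.2 < cur then (sq.1, sq.2.insert q.1 q.2) else sq
        else sq) sz) (false, (PySem.Dict.empty : PySem.Dict Int Int))
  if st.1 = false ∨ st.2.items = [] then none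
  else some ((PySem.List.sorted st.2.items (fun x => x.2) false).map (fun p => p.1))

-- ===== PRECONDITION & SPEC =====
def Spec_finde_alle_zahlenpaare (matrix : List (List Int)) (ziel : Int) (out : Option (List Int)) : Prop := out = finde_alle_zahlenpaare_alt matrix ziel
instance (matrix : List (List Int)) (ziel : Int) (out : Option (List Int)) : Decidable (Spec_finde_alle_zahlenpaare matrix ziel out) := by unfold Spec_finde_alle_zahlenpaare; infer_instance

-- ===== CLAIM (what is proved, stated in full; the proofs are below) =====
def Claim_equal_finde_alle_zahlenpaare : Prop := ∀ (matrix : List (List Int)) (ziel : Int), Dom_finde_alle_zahlenpaare matrix ziel → Spec_finde_alle_zahlenpaare matrix ziel (finde_alle_zahlenpaare matrix ziel)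


-- ===== LEMMAS AND PROOFS =====

def pvManh (p t : Int × Int) : Int := ((p.1 - t.1).natAbs : Int) + ((p.2 - t.2).natAbs : Int)
def pvMval (T : List (Int × Int)) (p : Int × Int) : Int :=
  match T with
  | [] => 0
  | z :: zr => (zr.map (pvManh p)).foldl min (pvManh p z)
def pvBmin (T : List (Int × Int)) (ps : List (Int × Int)) : Int :=
  match ps with
  | [] => 0
  | h :: t => t.foldl (fun a q => min a (pvMval T q)) (pvMval T h)
def pvF (pos : Int × Int) (m : Option Int) (zp : Int × Int) : Option Int :=
  match m with
  | none => some (pvManh pos zp)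
  | some w => if pvManh pos zp < w then some (pvManh pos zp) else some w
def pvStepFold (T : List (Int × Int)) (ps : List (Int × Int)) : Option Int :=
  ps.foldl (fun m pos => T.foldl (pvF pos) m) none

theorem pvOptFold (pos : Int × Int) (T : List (Int × Int)) (v : Int) :
    T.foldl (pvF pos) (some v) = some ((T.map (pvManh pos)).foldl min v) := by
  induction T generalizing v with
  | nil => rfl
  | cons z zr ih =>
    simp only [List.foldl_cons, List.map_cons]
    have h1 : pvF pos (some v) z = some (min v (pvManh pos z)) := by
      simp only [pvF]
      split_ifs with h
      · simp [min_eq_right h.le]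
      · simp [min_eq_left (not_lt.mp h)]
    rw [h1, ih]

theorem pvTFoldSome (pos : Int × Int) (T : List (Int × Int)) (v : Int) (hT : T ≠ []) :
    T.foldl (pvF pos) (some v) = some (min v (pvMval T pos)) := by
  cases T with
  | nil => exact absurd rfl hT
  | cons z zr =>
    rw [pvOptFold]
    simp only [List.map_cons, List.foldl_cons, pvMval]
    rw [List.foldl_assoc]

theorem pvTFoldNone (pos : Int × Int) (T : List (Int × Int)) (hT : T ≠ []) :
    T.foldl (pvF pos) none = some (pvMval T pos) := by
  cases T with
  | nil => exact absurd rfl hT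
  | cons z zr =>
    simp only [List.foldl_cons]
    rw [show pvF pos none z = some (pvManh pos z) from rfl, pvOptFold]
    rfl

theorem pvPosFold (T : List (Int × Int)) (hT : T ≠ []) (qr : List (Int × Int)) (v : Int) :
    qr.foldl (fun m pos => T.foldl (pvF pos) m) (some v)
      = some (qr.foldl (fun a q => min a (pvMval T q)) v) := by
  induction qr generalizing v with
  | nil => rfl
  | cons r rr ih =>
    simp only [List.foldl_cons]
    rw [pvTFoldSome r T _ hT, ih]

theorem pvStepFold_eq (T ps : List (Int × Int)) (hT : T ≠ []) (hps : ps ≠ []) :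
    pvStepFold T ps = some (pvBmin T ps) := by
  cases ps with
  | nil => exact absurd rfl hps
  | cons q qr =>
    unfold pvStepFold pvBmin
    simp only [List.foldl_cons]
    rw [pvTFoldNone q T hT, pvPosFold T hT]

theorem pvBmin_append (T : List (Int × Int)) (ps : List (Int × Int)) (x : Int × Int) (hps : ps ≠ []) :
    pvBmin T (ps ++ [x]) = min (pvBmin T ps) (pvMval T x) := by
  cases ps with
  | nil => exact absurd rfl hps
  | cons h t => simp [pvBmin, List.foldl_append]

theorem pvGetMap (l : List (Int × List (Int × Int))) (k : Int) (f : List (Int × Int) → Int) :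
    (PySem.Dict.mk (l.map (fun p => (p.1, f p.2)))).get? k
      = ((PySem.Dict.mk l).get? k).map f := by
  induction l with
  | nil => rfl
  | cons h t ih =>
    obtain ⟨k', v⟩ := h
    simp only [List.map_cons, PySem.Dict.get?_mk_cons, ih]
    split <;> rfl

def pvGA (ziel : Int) (d : PySem.Dict Int (List (Int × Int))) (c : (Int × Int) × Int) :
    PySem.Dict Int (List (Int × Int)) :=
  if c.2 = ziel then d
  else if c.2 ≠ 0 then
    match d.get? c.2 with
    | some ps => d.insert c.2 (ps ++ [c.1])
    | none    => d.insert c.2 [c.1]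
  else d

def pvGB2 (T : List (Int × Int)) (ziel : Int) (d : PySem.Dict Int Int) (c : (Int × Int) × Int) :
    PySem.Dict Int Int :=
  if c.2 ≠ ziel ∧ c.2 ≠ 0 then
    match d.get? c.2 with
    | none => d.insert c.2 (pvMval T c.1)
    | some cur => if pvMval T c.1 < cur then d.insert c.2 (pvMval T c.1) else d
  else d

theorem pvStep2 (T : List (Int × Int)) (ziel : Int)
    (d : PySem.Dict Int (List (Int × Int))) (e : PySem.Dict Int Int)
    (hnd : d.keys.Nodup) (hne : ∀ p ∈ d.items, p.2 ≠ [])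
    (hrel : e.items = d.items.map (fun p => (p.1, pvBmin T p.2))) (c : (Int × Int) × Int) :
    (pvGA ziel d c).keys.Nodup ∧
    (∀ p ∈ (pvGA ziel d c).items, p.2 ≠ []) ∧
    (pvGB2 T ziel e c).items = (pvGA ziel d c).items.map (fun p => (p.1, pvBmin T p.2)) := by
  have hget : ∀ k, e.get? k = (d.get? k).map (pvBmin T) := by
    intro k
    have he : e = PySem.Dict.mk (d.items.map (fun p => (p.1, pvBmin T p.2))) :=
      PySem.Dict.ext hrel
    rw [he, pvGetMap]
  by_cases hz : c.2 = ziel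
  · have e1 : pvGA ziel d c = d := by simp [pvGA, hz]
    have e2 : pvGB2 T ziel e c = e := by simp [pvGB2, hz]
    rw [e1, e2]; exact ⟨hnd, hne, hrel⟩
  by_cases h0 : c.2 = 0
  · have e1 : pvGA ziel d c = d := by simp [pvGA, h0]
    have e2 : pvGB2 T ziel e c = e := by simp [pvGB2, h0]
    rw [e1, e2]; exact ⟨hnd, hne, hrel⟩
  have e1 : pvGA ziel d c = (match d.get? c.2 with
      | some ps => d.insert c.2 (ps ++ [c.1])
      | none => d.insert c.2 [c.1]) := by
    simp [pvGA, hz, h0]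
  have e2 : pvGB2 T ziel e c = (match e.get? c.2 with
      | none => e.insert c.2 (pvMval T c.1)
      | some cur => if pvMval T c.1 < cur then e.insert c.2 (pvMval T c.1) else e) := by
    simp [pvGB2, hz, h0]
  rw [e1, e2, hget c.2]
  cases hgd : d.get? c.2 with
  | none =>
    have hcd : d.contains c.2 = false := by
      rw [PySem.Dict.contains_eq_isSome_get?, hgd]; rfl
    have hce : e.contains c.2 = false := by
      rw [PySem.Dict.contains_eq_isSome_get?, hget, hgd]; rfl
    simp only [Option.map_none]
    refine ⟨PySem.Dict.nodup_keys_insert d c.2 [c.1] hnd, ?_, ?_⟩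
    · intro p hp
      rw [PySem.Dict.items_insert_of_not_contains d _ hcd] at hp
      rcases List.mem_append.mp hp with h | h
      · exact hne p h
      · simp at h; subst h; simp
    · rw [PySem.Dict.items_insert_of_not_contains d _ hcd,
          PySem.Dict.items_insert_of_not_contains e _ hce, hrel]
      simp [pvBmin]
  | some ps =>
    have hps : ps ≠ [] := hne _ (PySem.Dict.mem_items_of_get?_eq_some d hgd)
    have hcd : d.contains c.2 = true := by
      rw [PySem.Dict.contains_eq_isSome_get?, hgd]; rfl
    have hce : e.contains c.2 = true := by
      rw [PySem.Dict.contains_eq_isSome_get?, hget, hgd]; rfl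
    simp only [Option.map_some]
    refine ⟨PySem.Dict.nodup_keys_insert d c.2 (ps ++ [c.1]) hnd, ?_, ?_⟩
    · intro p hp
      rw [PySem.Dict.items_insert_of_contains d _ hcd] at hp
      rcases List.mem_map.mp hp with ⟨p', hp', hpe⟩
      by_cases hk : (p'.1 == c.2) = true
      · rw [if_pos hk] at hpe; subst hpe; simp
      · rw [if_neg hk] at hpe; subst hpe; exact hne p' hp'
    · rw [PySem.Dict.items_insert_of_contains d _ hcd, List.map_map]
      by_cases hlt : pvMval T c.1 < pvBmin T ps
      · rw [if_pos hlt]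
        rw [PySem.Dict.items_insert_of_contains e _ hce, hrel, List.map_map]
        apply List.map_congr_left
        intro p hp
        simp only [Function.comp]
        by_cases hk : (p.1 == c.2) = true
        · simp only [hk, if_pos]
          rw [pvBmin_append T ps c.1 hps, min_eq_right hlt.le]
        · simp [hk]
      · rw [if_neg hlt, hrel]
        apply List.map_congr_left
        intro p hp
        simp only [Function.comp]
        by_cases hk : (p.1 == c.2) = true
        · have hpk : p.1 = c.2 := beq_iff_eq.mp hk
          have hsome : d.get? p.1 = some p.2 := PySem.Dict.get?_of_mem_items d hp hnd
          rw [hpk, hgd] at hsome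
          have hpps : p.2 = ps := (Option.some.inj hsome).symm
          simp only [hk, if_pos]
          rw [pvBmin_append T ps c.1 hps, min_eq_left (not_lt.mp hlt), hpps, hpk]
        · simp [hk]

-- the cells of the matrix in traversal order
def pvCells (matrix : List (List Int)) : List ((Int × Int) × Int) :=
  (PySem.List.enumerate matrix 0).flatMap
    (fun p => (PySem.List.enumerate p.2 0).map (fun q => ((p.1, q.1), q.2)))

def pvTargets (matrix : List (List Int)) (ziel : Int) : List (Int × Int) :=
  ((pvCells matrix).filter (fun c => decide (c.2 = ziel))).map (fun c => c.1)

def pvDictA (matrix : List (List Int)) (ziel : Int) : PySem.Dict Int (List (Int × Int)) :=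
  (pvCells matrix).foldl (pvGA ziel) PySem.Dict.empty

def pvDictB2 (matrix : List (List Int)) (ziel : Int) : PySem.Dict Int Int :=
  (pvCells matrix).foldl (pvGB2 (pvTargets matrix ziel) ziel) PySem.Dict.empty

-- a nested enumerate-fold is a fold over pvCells
theorem pvNested {σ : Type} (f : σ → ((Int × Int) × Int) → σ) (l : List (Int × List Int)) (s : σ) :
    l.foldl (fun s p => (PySem.List.enumerate p.2 0).foldl (fun s q => f s ((p.1, q.1), q.2)) s) s
      = (l.flatMap (fun p => (PySem.List.enumerate p.2 0).map (fun q => ((p.1, q.1), q.2)))).foldl f s := by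
  induction l generalizing s with
  | nil => rfl
  | cons h t ih => simp [List.foldl_append, List.foldl_map, ih]

-- A's combined fold computes the target list and A's dict
theorem pvFoldA (matrix : List (List Int)) (ziel : Int) :
    ((PySem.List.enumerate matrix 0).foldl (fun st p =>
      (PySem.List.enumerate p.2 0).foldl (fun st q =>
        if q.2 = ziel then (st.1 ++ [(p.1, q.1)], st.2)
        else if q.2 ≠ 0 then
          match st.2.get? q.2 with
          | some ps => (st.1, st.2.insert q.2 (ps ++ [(p.1, q.1)]))
          | none    => (st.1, st.2.insert q.2 [(p.1, q.1)])
        else st) st)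
      (([] : List (Int × Int)), (PySem.Dict.empty : PySem.Dict Int (List (Int × Int)))))
    = (pvTargets matrix ziel, pvDictA matrix ziel) := by
  have h2 : (pvCells matrix).foldl (fun st c =>
      ((fun (a : List (Int × Int)) (c : (Int × Int) × Int) =>
          if c.2 = ziel then a ++ [c.1] else a) st.1 c, pvGA ziel st.2 c))
      ([], PySem.Dict.empty) = (pvTargets matrix ziel, pvDictA matrix ziel) := by
    rw [PySem.List.foldl_prod_mk (f := fun (a : List (Int × Int)) (c : (Int × Int) × Int) => if c.2 = ziel then a ++ [c.1] else a) (g := pvGA ziel)]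
    unfold pvDictA pvTargets
    congr 1
    rw [PySem.List.foldl_append_ite (p := fun (c : (Int × Int) × Int) => c.2 = ziel) (f := fun (c : (Int × Int) × Int) => c.1)]
    simp
  refine Eq.trans ?_ h2
  refine Eq.trans (pvNested (f := fun st c =>
      if c.2 = ziel then (st.1 ++ [c.1], st.2)
      else if c.2 ≠ 0 then
        match st.2.get? c.2 with
        | some ps => (st.1, st.2.insert c.2 (ps ++ [c.1]))
        | none    => (st.1, st.2.insert c.2 [c.1])
      else st) (PySem.List.enumerate matrix 0) ([], PySem.Dict.empty)) ?_
  apply PySem.List.foldl_congr_mem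
  intro acc c _
  simp only [pvGA]
  split_ifs with h1 h2
  · rfl
  · cases acc.2.get? c.2 <;> rfl
  · rfl

theorem pvA_eq (matrix : List (List Int)) (ziel : Int) :
    finde_alle_zahlenpaare matrix ziel =
      if pvTargets matrix ziel = [] ∨ (pvDictA matrix ziel).items = [] then none
      else some ((PySem.List.sorted
        ((pvDictA matrix ziel).items.map (fun pz => (pz.1, (pvStepFold (pvTargets matrix ziel) pz.2).getD 0)))
        (fun x => x.2) false).map (fun p => p.1)) := by
  unfold finde_alle_zahlenpaare
  rw [pvFoldA]
  show (if pvTargets matrix ziel = []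
        ∨ (pvDictA matrix ziel).items = [] then none
      else some ((PySem.List.sorted
        ((pvDictA matrix ziel).items.foldl (fun acc pz =>
          acc ++ [(pz.1, (pvStepFold (pvTargets matrix ziel) pz.2).getD 0)]) [])
        (fun x => x.2) false).map (fun p => p.1))) = _
  rw [PySem.List.foldl_append_singleton_eq_map
      (fun (pz : Int × List (Int × Int)) => (pz.1, (pvStepFold (pvTargets matrix ziel) pz.2).getD 0))]
  rfl

-- dict invariant relating A's and B's folds
theorem pvInvFold2 (T : List (Int × Int)) (ziel : Int) (cs : List ((Int × Int) × Int))
    (d : PySem.Dict Int (List (Int × Int))) (e : PySem.Dict Int Int)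
    (hnd : d.keys.Nodup) (hne : ∀ p ∈ d.items, p.2 ≠ [])
    (hrel : e.items = d.items.map (fun p => (p.1, pvBmin T p.2))) :
    (cs.foldl (pvGA ziel) d).keys.Nodup ∧
    (∀ p ∈ (cs.foldl (pvGA ziel) d).items, p.2 ≠ []) ∧
    (cs.foldl (pvGB2 T ziel) e).items
      = (cs.foldl (pvGA ziel) d).items.map (fun p => (p.1, pvBmin T p.2)) := by
  induction cs generalizing d e with
  | nil => exact ⟨hnd, hne, hrel⟩
  | cons c cs ih =>
    obtain ⟨h1, h2, h3⟩ := pvStep2 T ziel d e hnd hne hrel c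
    exact ih (pvGA ziel d c) (pvGB2 T ziel e c) h1 h2 h3

-- ===== minimum characterisation =====

def pvIsMin (v : Int) (P : Int → Prop) : Prop := P v ∧ ∀ x, P x → v ≤ x

theorem pvIsMin_unique {v w : Int} {P : Int → Prop} (hv : pvIsMin v P) (hw : pvIsMin w P) :
    v = w := le_antisymm (hv.2 w hw.1) (hw.2 v hv.1)

theorem pvIsMin_trans {v : Int} {P Q : Int → Prop} (h : pvIsMin v P)
    (dom : ∀ x, P x → ∃ y, Q y ∧ y ≤ x) (lb : ∀ y, Q y → v ≤ y) : pvIsMin v Q := by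
  obtain ⟨y, hQ, hle⟩ := dom v h.1
  have : v = y := le_antisymm (lb y hQ) hle
  exact ⟨this ▸ hQ, lb⟩

theorem pvFoldlMin (t : List Int) (x : Int) :
    (t.foldl min x = x ∨ t.foldl min x ∈ t) ∧
    (t.foldl min x ≤ x ∧ ∀ y ∈ t, t.foldl min x ≤ y) := by
  induction t generalizing x with
  | nil => simp
  | cons a t ih =>
    simp only [List.foldl_cons, List.mem_cons]
    have h1 := (ih (min x a)).1
    have h2 := (ih (min x a)).2.1
    have h3 := (ih (min x a)).2.2
    constructor
    · rcases h1 with h | h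
      · rcases min_choice x a with hm | hm
        · left; rw [h, hm]
        · right; left; rw [h, hm]
      · right; right; exact h
    · refine ⟨le_trans h2 (min_le_left _ _), fun y hy => ?_⟩
      rcases hy with e | hy
      · rw [e]; exact le_trans h2 (min_le_right _ _)
      · exact h3 y hy

theorem pvMval_isMin (T : List (Int × Int)) (hT : T ≠ []) (pos : Int × Int) :
    pvIsMin (pvMval T pos) (fun x => ∃ t ∈ T, x = pvManh pos t) := by
  cases T with
  | nil => exact absurd rfl hT
  | cons z zr =>
    simp only [pvMval]
    have h1 := (pvFoldlMin (zr.map (pvManh pos)) (pvManh pos z)).1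
    have h2 := (pvFoldlMin (zr.map (pvManh pos)) (pvManh pos z)).2.1
    have h3 := (pvFoldlMin (zr.map (pvManh pos)) (pvManh pos z)).2.2
    constructor
    · rcases h1 with h | h
      · exact ⟨z, by simp, h⟩
      · obtain ⟨t, ht, he⟩ := List.mem_map.mp h
        exact ⟨t, by simp [ht], he.symm⟩
    · rintro x ⟨t, ht, rfl⟩
      rcases List.mem_cons.mp ht with rfl | ht
      · exact h2
      · exact h3 _ (List.mem_map_of_mem ht)



-- ===== 1D sweep =====

def pvSweepRec (links : Int) : List (Int × Int) → List Int
  | [] => []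
  | vo :: rest =>
    min (min vo.1 (vo.2 + 1)) (links + 1) :: pvSweepRec (min (min vo.1 (vo.2 + 1)) (links + 1)) rest

theorem pvSweepRec_length (L : Int) (l : List (Int × Int)) :
    (pvSweepRec L l).length = l.length := by
  induction l generalizing L with
  | nil => rfl
  | cons vo rest ih => simp [pvSweepRec, ih]

theorem pvDurchlauf_aux (l : List (Int × Int)) (acc : List Int) (L : Int) :
    (l.foldl (fun (st : List Int × Int) vo =>
      let links := min (min vo.1 (vo.2 + 1)) (st.2 + 1)
      (st.1 ++ [links], links)) (acc, L)).1 = acc ++ pvSweepRec L l := by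
  induction l generalizing acc L with
  | nil => simp [pvSweepRec]
  | cons vo rest ih =>
    simp only [List.foldl_cons]
    exact (ih _ _).trans (by simp [pvSweepRec])

theorem pvDurchlauf_eq (p w : List Int) (INF : Int) :
    pvDurchlauf p w INF = pvSweepRec INF (w.zip p) := by
  unfold pvDurchlauf
  rw [pvDurchlauf_aux]
  rfl

theorem pvSweep_isMin (l : List (Int × Int)) (L : Int) (j : Nat) (hj : j < l.length) :
    pvIsMin ((pvSweepRec L l).getD j 0) (fun x =>
      x = L + 1 + (j : Int) ∨ ∃ k : Nat, k ≤ j ∧ k < l.length ∧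
        (x = (l.getD k (0,0)).1 + ((j : Int) - k) ∨ x = (l.getD k (0,0)).2 + 1 + ((j : Int) - k))) := by
  induction l generalizing L j with
  | nil => simp at hj
  | cons vo rest ih =>
    cases j with
    | zero =>
      simp only [pvSweepRec, List.getD_cons_zero]
      constructor
      · rcases min_choice (min vo.1 (vo.2 + 1)) (L + 1) with hm | hm
        · rcases min_choice vo.1 (vo.2 + 1) with hm2 | hm2
          · right; exact ⟨0, le_refl _, by simp, Or.inl (by rw [hm, hm2]; simp)⟩
          · right; exact ⟨0, le_refl _, by simp, Or.inr (by rw [hm, hm2]; simp)⟩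
        · left; rw [hm]; simp
      · rintro x (rfl | ⟨k, hk0, _, hx⟩)
        · calc min (min vo.1 (vo.2 + 1)) (L + 1) ≤ L + 1 := min_le_right _ _
            _ ≤ L + 1 + ((0:Nat) : Int) := by simp
        · interval_cases k
          simp only [List.getD_cons_zero] at hx
          rcases hx with rfl | rfl
          · calc min (min vo.1 (vo.2 + 1)) (L + 1) ≤ vo.1 := le_trans (min_le_left _ _) (min_le_left _ _)
              _ ≤ vo.1 + (((0:Nat) : Int) - ((0:Nat) : Int)) := by simp
          · calc min (min vo.1 (vo.2 + 1)) (L + 1) ≤ vo.2 + 1 := le_trans (min_le_left _ _) (min_le_right _ _)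
              _ ≤ vo.2 + 1 + (((0:Nat) : Int) - ((0:Nat) : Int)) := by simp
    | succ j' =>
      have hj' : j' < rest.length := by simpa using hj
      have hx0a : min (min vo.1 (vo.2 + 1)) (L + 1) ≤ vo.1 := le_trans (min_le_left _ _) (min_le_left _ _)
      have hx0b : min (min vo.1 (vo.2 + 1)) (L + 1) ≤ vo.2 + 1 := le_trans (min_le_left _ _) (min_le_right _ _)
      have hx0c : min (min vo.1 (vo.2 + 1)) (L + 1) ≤ L + 1 := min_le_right _ _
      have goalElem : (pvSweepRec L (vo :: rest)).getD (j' + 1) 0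
          = (pvSweepRec (min (min vo.1 (vo.2 + 1)) (L + 1)) rest).getD j' 0 := by
        simp [pvSweepRec]
      rw [goalElem]
      refine pvIsMin_trans (ih (min (min vo.1 (vo.2 + 1)) (L + 1)) j' hj') ?_ ?_
      · rintro x (rfl | ⟨k, hkj, hkl, hx⟩)
        · -- chain candidate of the tail sweep
          rcases min_choice (min vo.1 (vo.2 + 1)) (L + 1) with hm | hm
          · rcases min_choice vo.1 (vo.2 + 1) with hm2 | hm2
            · exact ⟨vo.1 + ((j' + 1 : Nat) : Int), Or.inr ⟨0, by omega, by simp,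
                Or.inl (by simp)⟩, by rw [hm, hm2]; push_cast; omega⟩
            · exact ⟨vo.2 + 1 + ((j' + 1 : Nat) : Int), Or.inr ⟨0, by omega, by simp,
                Or.inr (by simp)⟩, by rw [hm, hm2]; push_cast; omega⟩
          · exact ⟨L + 1 + ((j' + 1 : Nat) : Int), Or.inl rfl, by rw [hm]; push_cast; omega⟩
        · refine ⟨x, Or.inr ⟨k + 1, by omega, by simpa using hkl, ?_⟩, le_refl x⟩
          simp only [List.getD_cons_succ]
          rcases hx with rfl | rfl
          · left; push_cast; ring_nf
          · right; push_cast; ring_nf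
      · rintro y (rfl | ⟨k, hkj, hkl, hy⟩)
        · have := (ih (min (min vo.1 (vo.2 + 1)) (L + 1)) j' hj').2
            (min (min vo.1 (vo.2 + 1)) (L + 1) + 1 + (j' : Int)) (Or.inl rfl)
          push_cast
          omega
        · cases k with
          | zero =>
            have := (ih (min (min vo.1 (vo.2 + 1)) (L + 1)) j' hj').2
              (min (min vo.1 (vo.2 + 1)) (L + 1) + 1 + (j' : Int)) (Or.inl rfl)
            simp only [List.getD_cons_zero] at hy
            rcases hy with rfl | rfl
            · push_cast; omega
            · push_cast; omega
          | succ k' =>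
            simp only [List.getD_cons_succ] at hy
            have hk' : k' ≤ j' := by omega
            have hk'l : k' < rest.length := by simpa using hkl
            have := (ih (min (min vo.1 (vo.2 + 1)) (L + 1)) j' hj').2 y
              (Or.inr ⟨k', hk', hk'l, by
                rcases hy with rfl | rfl
                · left; push_cast; ring_nf
                · right; push_cast; ring_nf⟩)
            exact this


-- ===== 2D pass =====

def pvAt (g : List (List Int)) (a b : Nat) : Int := (g.getD a []).getD b 0

def pvFRows (INF : Int) (prev : List Int) : List (List Int) → List (List Int)
  | [] => []
  | r :: rs => pvSweepRec INF (r.zip prev) :: pvFRows INF (pvSweepRec INF (r.zip prev)) rs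

theorem pvFRows_length (INF : Int) (prev : List Int) (rows : List (List Int)) :
    (pvFRows INF prev rows).length = rows.length := by
  induction rows generalizing prev with
  | nil => rfl
  | cons r rs ih => simp [pvFRows, ih]

theorem pvFRows_row_length (INF : Int) (W : Nat) (prev : List Int) (rows : List (List Int))
    (hp : prev.length = W) (hr : ∀ r ∈ rows, r.length = W) :
    ∀ ro ∈ pvFRows INF prev rows, ro.length = W := by
  induction rows generalizing prev with
  | nil => simp [pvFRows]
  | cons r rs ih =>
    intro ro hro
    have hs : (pvSweepRec INF (r.zip prev)).length = W := by
      rw [pvSweepRec_length, List.length_zip, hr r (by simp), hp]; simp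
    rcases List.mem_cons.mp hro with rfl | hro
    · exact hs
    · exact ih _ hs (fun r' h => hr r' (by simp [h])) ro hro

theorem pvFoldRows (INF : Int) (rows : List (List Int)) (prev : List Int)
    (acc : List (List Int)) :
    (rows.foldl (fun (st : List Int × List (List Int)) zeile =>
      let z := pvDurchlauf st.1 zeile INF
      (z, st.2 ++ [z])) (prev, acc)).2 = acc ++ pvFRows INF prev rows := by
  induction rows generalizing prev acc with
  | nil => simp [pvFRows]
  | cons r rs ih =>
    simp only [List.foldl_cons]
    rw [show pvDurchlauf prev r INF = pvSweepRec INF (r.zip prev) from pvDurchlauf_eq prev r INF] at *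
    exact (ih _ _).trans (by simp [pvFRows])

theorem pvZipGetD (xs ys : List Int) (k : Nat) (hx : k < xs.length) (hy : k < ys.length) :
    (xs.zip ys).getD k (0,0) = (xs.getD k 0, ys.getD k 0) := by
  induction xs generalizing ys k with
  | nil => simp at hx
  | cons a xs ih =>
    cases ys with
    | nil => simp at hy
    | cons b ys =>
      cases k with
      | zero => simp
      | succ k =>
        simp only [List.zip_cons_cons, List.getD_cons_succ]
        exact ih ys k (by simpa using hx) (by simpa using hy)

theorem pvFRows_isMin (INF : Int) (W : Nat) (rows : List (List Int)) :
    ∀ (prev : List Int) (PC : Nat → Int → Prop),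
    (∀ r ∈ rows, r.length = W) → prev.length = W →
    (∀ r ∈ rows, ∀ b : Nat, b < W → r.getD b 0 ≤ INF) →
    (∀ k : Nat, k < W → pvIsMin (prev.getD k 0) (PC k)) →
    ∀ i : Nat, i < rows.length → ∀ j : Nat, j < W →
    pvIsMin (pvAt (pvFRows INF prev rows) i j)
      (fun x => (∃ a b : Nat, a ≤ i ∧ b ≤ j ∧ x = pvAt rows a b + ((i:Int) - a) + ((j:Int) - b))
              ∨ (∃ k : Nat, ∃ y : Int, k ≤ j ∧ k < W ∧ PC k y ∧ x = y + (1 + (i:Int)) + ((j:Int) - k))) := by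
  induction rows with
  | nil => intro prev PC _ _ _ _ i hi; simp at hi
  | cons r rs ih =>
    intro prev PC hlen hplen hle hprev i hi j hj
    have hrlen : r.length = W := hlen r (by simp)
    have hzlen : (r.zip prev).length = W := by
      rw [List.length_zip, hrlen, hplen]; simp
    have hrowchar : ∀ k : Nat, k < W →
        pvIsMin ((pvSweepRec INF (r.zip prev)).getD k 0)
          (fun x => (∃ b : Nat, b ≤ k ∧ x = r.getD b 0 + ((k:Int) - b))
                  ∨ (∃ k' : Nat, ∃ y : Int, k' ≤ k ∧ k' < W ∧ PC k' y ∧ x = y + 1 + ((k:Int) - k'))) := by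
      intro k hk
      have hkz : k < (r.zip prev).length := by omega
      refine pvIsMin_trans (pvSweep_isMin (r.zip prev) INF k hkz) ?_ ?_
      · rintro x (rfl | ⟨b, hbk, hbl, hx⟩)
        · refine ⟨r.getD k 0 + ((k:Int) - k), Or.inl ⟨k, le_refl k, rfl⟩, ?_⟩
          have := hle r (by simp) k hk
          omega
        · have hzb : (r.zip prev).getD b (0,0) = (r.getD b 0, prev.getD b 0) :=
            pvZipGetD r prev b (by omega) (by omega)
          rcases hx with rfl | rfl
          · refine ⟨((r.zip prev).getD b (0,0)).1 + ((k:Int) - (b:Int)),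
              Or.inl ⟨b, hbk, ?_⟩, le_refl _⟩
            rw [hzb]
          · refine ⟨_, Or.inr ⟨b, prev.getD b 0, hbk, by omega, (hprev b (by omega)).1, rfl⟩,
              le_of_eq (by rw [hzb])⟩
      · rintro y (⟨b, hbk, rfl⟩ | ⟨k', y', hk'k, hk'W, hPC, rfl⟩)
        · refine (pvSweep_isMin (r.zip prev) INF k hkz).2 _
            (Or.inr ⟨b, hbk, by omega, Or.inl ?_⟩)
          rw [pvZipGetD r prev b (by omega) (by omega)]
        · have h1 := (pvSweep_isMin (r.zip prev) INF k hkz).2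
            (((r.zip prev).getD k' (0,0)).2 + 1 + ((k:Int) - k'))
            (Or.inr ⟨k', hk'k, by omega, Or.inr rfl⟩)
          have h2 := (hprev k' hk'W).2 y' hPC
          rw [pvZipGetD r prev k' (by omega) (by omega)] at h1
          simp only at h1
          omega
    cases i with
    | zero =>
      have hat : pvAt (pvFRows INF prev (r :: rs)) 0 j
          = (pvSweepRec INF (r.zip prev)).getD j 0 := by simp [pvAt, pvFRows]
      rw [hat]
      refine pvIsMin_trans (hrowchar j hj) ?_ ?_
      · rintro x (⟨b, hbj, rfl⟩ | ⟨k', y', hk'j, hk'W, hPC, rfl⟩)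
        · refine ⟨_, Or.inl ⟨0, b, le_refl 0, hbj, rfl⟩, le_of_eq ?_⟩
          simp [pvAt]
        · exact ⟨_, Or.inr ⟨k', y', hk'j, hk'W, hPC, rfl⟩, le_of_eq (by push_cast; ring)⟩
      · rintro y (⟨a, b, ha, hbj, rfl⟩ | ⟨k', y', hk'j, hk'W, hPC, rfl⟩)
        · interval_cases a
          have := (hrowchar j hj).2 (r.getD b 0 + ((j:Int) - b)) (Or.inl ⟨b, hbj, rfl⟩)
          have hat2 : pvAt (r :: rs) 0 b = r.getD b 0 := by simp [pvAt]
          rw [hat2]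
          omega
        · have := (hrowchar j hj).2 (y' + 1 + ((j:Int) - k')) (Or.inr ⟨k', y', hk'j, hk'W, hPC, rfl⟩)
          omega
    | succ i' =>
      have hat : pvAt (pvFRows INF prev (r :: rs)) (i' + 1) j
          = pvAt (pvFRows INF (pvSweepRec INF (r.zip prev)) rs) i' j := by simp [pvAt, pvFRows]
      rw [hat]
      have hi' : i' < rs.length := by simpa using hi
      have hslen : (pvSweepRec INF (r.zip prev)).length = W := by
        rw [pvSweepRec_length, hzlen]
      refine pvIsMin_trans
        (ih (pvSweepRec INF (r.zip prev))
          (fun k x => (∃ b : Nat, b ≤ k ∧ x = r.getD b 0 + ((k:Int) - b))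
                    ∨ (∃ k' : Nat, ∃ y : Int, k' ≤ k ∧ k' < W ∧ PC k' y ∧ x = y + 1 + ((k:Int) - k')))
          (fun r' h => hlen r' (by simp [h])) hslen
          (fun r' h => hle r' (by simp [h])) hrowchar i' hi' j hj) ?_ ?_
      · rintro x (⟨a, b, ha, hbj, rfl⟩ | ⟨k, y, hkj, hkW, hPC0, rfl⟩)
        · refine ⟨_, Or.inl ⟨a + 1, b, by omega, hbj, rfl⟩, le_of_eq ?_⟩
          have : pvAt (r :: rs) (a + 1) b = pvAt rs a b := by simp [pvAt]
          rw [this]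
          push_cast
          ring
        · rcases hPC0 with ⟨b, hbk, rfl⟩ | ⟨k', y', hk'k, hk'W, hPC, rfl⟩
          · refine ⟨_, Or.inl ⟨0, b, by omega, by omega, rfl⟩, le_of_eq ?_⟩
            have : pvAt (r :: rs) 0 b = r.getD b 0 := by simp [pvAt]
            rw [this]
            push_cast
            ring
          · exact ⟨_, Or.inr ⟨k', y', by omega, hk'W, hPC, rfl⟩, le_of_eq (by push_cast; ring)⟩
      · have ihmin := ih (pvSweepRec INF (r.zip prev))
          (fun k x => (∃ b : Nat, b ≤ k ∧ x = r.getD b 0 + ((k:Int) - b))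
                    ∨ (∃ k' : Nat, ∃ y : Int, k' ≤ k ∧ k' < W ∧ PC k' y ∧ x = y + 1 + ((k:Int) - k')))
          (fun r' h => hlen r' (by simp [h])) hslen
          (fun r' h => hle r' (by simp [h])) hrowchar i' hi' j hj
        rintro y (⟨a, b, ha, hbj, rfl⟩ | ⟨k, y', hkj, hkW, hPC, rfl⟩)
        · cases a with
          | zero =>
            have := ihmin.2 ((r.getD b 0 + ((b:Int) - b)) + (1 + (i':Int)) + ((j:Int) - b))
              (Or.inr ⟨b, r.getD b 0 + ((b:Int) - b), hbj, by omega,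
                Or.inl ⟨b, le_refl b, by omega⟩, rfl⟩)
            have hat2 : pvAt (r :: rs) 0 b = r.getD b 0 := by simp [pvAt]
            rw [hat2]
            omega
          | succ a' =>
            have := ihmin.2 (pvAt rs a' b + ((i':Int) - a') + ((j:Int) - b))
              (Or.inl ⟨a', b, by omega, hbj, rfl⟩)
            have hat2 : pvAt (r :: rs) (a' + 1) b = pvAt rs a' b := by simp [pvAt]
            rw [hat2]
            push_cast at *
            omega
        · have := ihmin.2 ((y' + 1 + ((k:Int) - k)) + (1 + (i':Int)) + ((j:Int) - k))
            (Or.inr ⟨k, y' + 1 + ((k:Int) - k), hkj, hkW,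
              Or.inr ⟨k, y', le_refl k, hkW, hPC, rfl⟩, rfl⟩)
          push_cast at *
          omega


-- ===== the grid, its width, and the distance transform =====

def pvWn (matrix : List (List Int)) : Nat := (matrix.map List.length).foldl max 0
def pvINF (matrix : List (List Int)) : Int := (matrix.length : Int) + (pvWn matrix : Int) + 1
def pvG (matrix : List (List Int)) (ziel : Int) (a b : Nat) : Int :=
  match matrix[a]?.bind (fun r => r[b]?) with
  | some x => if x = ziel then 0 else pvINF matrix
  | none => pvINF matrix
def pvGitter (matrix : List (List Int)) (ziel : Int) : List (List Int) :=
  matrix.map (fun z => z.map (fun x => if x = ziel then 0 else pvINF matrix)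
    ++ List.replicate (pvWn matrix - z.length) (pvINF matrix))
def pvV (matrix : List (List Int)) (ziel : Int) : List (List Int) :=
  pvFRows (pvINF matrix) (List.replicate (pvWn matrix) (pvINF matrix)) (pvGitter matrix ziel)
def pvBk (matrix : List (List Int)) (ziel : Int) : List (List Int) :=
  pvFRows (pvINF matrix) (List.replicate (pvWn matrix) (pvINF matrix))
    ((pvV matrix ziel).reverse.map List.reverse)
def pvE (matrix : List (List Int)) (ziel : Int) : List (List Int) :=
  (pvBk matrix ziel).reverse.map List.reverse

theorem pvRowLe (matrix : List (List Int)) (z : List Int) (hz : z ∈ matrix) :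
    z.length ≤ pvWn matrix :=
  (PySem.List.le_foldl_max (matrix.map List.length) 0).2 _ (List.mem_map_of_mem hz)

theorem pvCastFold (t : List Nat) (x : Nat) :
    (t.map (Nat.cast : Nat → Int)).foldl max ((x : Nat) : Int) = ((t.foldl max x : Nat) : Int) := by
  induction t generalizing x with
  | nil => rfl
  | cons a t ih => simp only [List.map_cons, List.foldl_cons, ← Nat.cast_max, ih]

theorem pvBreite_eq (matrix : List (List Int)) :
    PySem.List.maxD (matrix.map (fun z => PySem.List.len z)) (fun x => x) 0 = (pvWn matrix : Int) := by
  cases matrix with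
  | nil => simp [PySem.List.maxD, PySem.List.max?, pvWn]
  | cons z t =>
    rw [List.map_cons, PySem.List.maxD_id_cons]
    have hmap : t.map (fun z => PySem.List.len z) = (t.map List.length).map (Nat.cast : Nat → Int) := by
      rw [List.map_map]; apply List.map_congr_left; intro a _; simp [PySem.List.len_eq]
    rw [hmap, show PySem.List.len z = ((z.length : Nat) : Int) from by simp [PySem.List.len_eq],
      pvCastFold]
    simp [pvWn]

theorem pvGitter_row_length (matrix : List (List Int)) (ziel : Int) :
    ∀ z ∈ pvGitter matrix ziel, z.length = pvWn matrix := by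
  intro z hz
  obtain ⟨w, hw, rfl⟩ := List.mem_map.mp hz
  have := pvRowLe matrix w hw
  simp only [List.length_append, List.length_map, List.length_replicate]
  omega

theorem pvGitter_length (matrix : List (List Int)) (ziel : Int) :
    (pvGitter matrix ziel).length = matrix.length := by simp [pvGitter]

theorem pvINF_pos (matrix : List (List Int)) : 0 < pvINF matrix := by
  unfold pvINF
  have h1 : (0:Int) ≤ (matrix.length : Int) := Int.natCast_nonneg _
  have h2 : (0:Int) ≤ ((pvWn matrix) : Int) := Int.natCast_nonneg _
  omega

theorem pvG_le (matrix : List (List Int)) (ziel : Int) (a b : Nat) :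
    pvG matrix ziel a b ≤ pvINF matrix := by
  unfold pvG
  have := pvINF_pos matrix
  cases matrix[a]?.bind (fun r => r[b]?) with
  | none => exact le_refl _
  | some x =>
    by_cases h : x = ziel
    · simp only [h, if_true]; omega
    · simp only [if_neg h]; exact le_refl _

theorem pvGitter_at (matrix : List (List Int)) (ziel : Int) (a b : Nat)
    (ha : a < matrix.length) (hb : b < pvWn matrix) :
    pvAt (pvGitter matrix ziel) a b = pvG matrix ziel a b := by
  unfold pvAt pvGitter pvG
  have hga : (matrix.map (fun z => z.map (fun x => if x = ziel then 0 else pvINF matrix)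
        ++ List.replicate (pvWn matrix - z.length) (pvINF matrix))).getD a []
      = (matrix[a]'ha).map (fun x => if x = ziel then 0 else pvINF matrix)
        ++ List.replicate (pvWn matrix - (matrix[a]'ha).length) (pvINF matrix) := by
    rw [List.getD_eq_getElem _ _ (by simpa using ha), List.getElem_map]
  rw [hga, List.getElem?_eq_getElem ha]
  simp only [Option.bind_some]
  by_cases hbz : b < (matrix[a]'ha).length
  · rw [List.getD_append _ _ _ _ (by simpa using hbz),
      List.getD_eq_getElem _ _ (by simpa using hbz), List.getElem_map,
      List.getElem?_eq_getElem hbz]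
  · have hble : (matrix[a]'ha).length ≤ b := le_of_not_gt hbz
    rw [List.getElem?_eq_none (by omega)]
    have hlen : ((matrix[a]'ha).map (fun x => if x = ziel then 0 else pvINF matrix)
        ++ List.replicate (pvWn matrix - (matrix[a]'ha).length) (pvINF matrix)).length
        = pvWn matrix := by
      have := pvRowLe matrix (matrix[a]'ha) (List.getElem_mem _)
      simp only [List.length_append, List.length_map, List.length_replicate]
      omega
    rw [List.getD_eq_getElem _ _ (by rw [hlen]; omega),
      List.getElem_append_right (by simpa using hble)]
    simp

theorem pvGitter_le (matrix : List (List Int)) (ziel : Int) :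
    ∀ r ∈ pvGitter matrix ziel, ∀ b : Nat, b < pvWn matrix → r.getD b 0 ≤ pvINF matrix := by
  intro r hr b hb
  obtain ⟨a, ha, hra⟩ := List.mem_iff_getElem.mp hr
  have hout : (pvGitter matrix ziel).getD a [] = r := by
    rw [List.getD_eq_getElem (pvGitter matrix ziel) [] (by simpa using ha)]; exact hra
  have heq : r.getD b 0 = pvAt (pvGitter matrix ziel) a b := by
    unfold pvAt; rw [hout]
  rw [heq, pvGitter_at matrix ziel a b (by rw [← pvGitter_length matrix ziel]; omega) hb]
  exact pvG_le matrix ziel a b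

-- chain-free characterisation of a transform started from the INF row
theorem pvClean (INF : Int) (W : Nat) (rows : List (List Int))
    (hlen : ∀ r ∈ rows, r.length = W)
    (hle : ∀ r ∈ rows, ∀ b : Nat, b < W → r.getD b 0 ≤ INF) :
    ∀ i : Nat, i < rows.length → ∀ j : Nat, j < W →
    pvIsMin (pvAt (pvFRows INF (List.replicate W INF) rows) i j)
      (fun x => ∃ a b : Nat, a ≤ i ∧ b ≤ j ∧ x = pvAt rows a b + ((i:Int) - a) + ((j:Int) - b)) := by
  intro i hi j hj
  have hrep : ∀ k : Nat, k < W → pvIsMin ((List.replicate W INF).getD k 0) (fun y => y = INF) := by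
    intro k hk
    have h : (List.replicate W INF).getD k 0 = INF := by
      rw [List.getD_eq_getElem _ _ (by simpa using hk)]; simp
    rw [h]
    exact ⟨rfl, fun x hx => le_of_eq hx.symm⟩
  have hmem : rows.getD i [] ∈ rows := by
    rw [List.getD_eq_getElem _ _ (by simpa using hi)]; exact List.getElem_mem _
  have hbase := pvFRows_isMin INF W rows (List.replicate W INF) (fun _ y => y = INF)
    hlen (by simp) hle hrep i hi j hj
  refine pvIsMin_trans hbase ?_ ?_
  · rintro x (⟨a, b, ha, hb, rfl⟩ | ⟨k, y, hkj, hkW, rfl, rfl⟩)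
    · exact ⟨_, ⟨a, b, ha, hb, rfl⟩, le_refl _⟩
    · refine ⟨pvAt rows i j + ((i:Int) - i) + ((j:Int) - j), ⟨i, j, le_refl i, le_refl j, rfl⟩, ?_⟩
      have := hle _ hmem j hj
      unfold pvAt
      omega
  · rintro y ⟨a, b, ha, hb, rfl⟩
    exact hbase.2 _ (Or.inl ⟨a, b, ha, hb, rfl⟩)

theorem pvV_length (matrix : List (List Int)) (ziel : Int) :
    (pvV matrix ziel).length = matrix.length := by
  rw [pvV, pvFRows_length, pvGitter_length]

theorem pvV_rowlen (matrix : List (List Int)) (ziel : Int) :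
    ∀ r ∈ pvV matrix ziel, r.length = pvWn matrix :=
  pvFRows_row_length _ _ _ _ (by simp) (pvGitter_row_length matrix ziel)

theorem pvV_isMin (matrix : List (List Int)) (ziel : Int) :
    ∀ i : Nat, i < matrix.length → ∀ j : Nat, j < pvWn matrix →
    pvIsMin (pvAt (pvV matrix ziel) i j)
      (fun x => ∃ a b : Nat, a ≤ i ∧ b ≤ j ∧
        x = pvG matrix ziel a b + ((i:Int) - a) + ((j:Int) - b)) := by
  intro i hi j hj
  have h := pvClean (pvINF matrix) (pvWn matrix) (pvGitter matrix ziel)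
    (pvGitter_row_length matrix ziel) (pvGitter_le matrix ziel) i
    (by rw [pvGitter_length]; omega) j hj
  refine pvIsMin_trans h ?_ ?_
  · rintro x ⟨a, b, ha, hb, rfl⟩
    refine ⟨pvG matrix ziel a b + ((i:Int) - a) + ((j:Int) - b), ⟨a, b, ha, hb, rfl⟩, le_of_eq ?_⟩
    rw [pvGitter_at matrix ziel a b (by omega) (by omega)]
  · rintro y ⟨a, b, ha, hb, rfl⟩
    have h2 := h.2 (pvAt (pvGitter matrix ziel) a b + ((i:Int) - a) + ((j:Int) - b))
      ⟨a, b, ha, hb, rfl⟩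
    rw [pvGitter_at matrix ziel a b (by omega) (by omega)] at h2
    exact h2

theorem pvV_le (matrix : List (List Int)) (ziel : Int) :
    ∀ i : Nat, i < matrix.length → ∀ j : Nat, j < pvWn matrix →
    pvAt (pvV matrix ziel) i j ≤ pvINF matrix := by
  intro i hi j hj
  have h := (pvV_isMin matrix ziel i hi j hj).2
    (pvG matrix ziel i j + ((i:Int) - i) + ((j:Int) - j)) ⟨i, j, le_refl i, le_refl j, rfl⟩
  have := pvG_le matrix ziel i j
  omega

theorem pvAtRevMap (g : List (List Int)) (W : Nat) (hW : ∀ r ∈ g, r.length = W)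
    (i j : Nat) (hi : i < g.length) (hj : j < W) :
    pvAt (g.reverse.map List.reverse) i j = pvAt g (g.length - 1 - i) (W - 1 - j) := by
  unfold pvAt
  have h1 : (g.reverse.map List.reverse).getD i []
      = (g[g.length - 1 - i]'(by omega)).reverse := by
    rw [List.getD_eq_getElem (g.reverse.map List.reverse) [] (by simpa using hi),
      List.getElem_map, List.getElem_reverse]
  have hrl : (g[g.length - 1 - i]'(by omega)).length = W := hW _ (List.getElem_mem _)
  have h2 : g.getD (g.length - 1 - i) [] = g[g.length - 1 - i]'(by omega) :=
    List.getD_eq_getElem g [] (by omega)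
  rw [h1, h2]
  rw [List.getD_eq_getElem _ 0 (by rw [List.length_reverse, hrl]; omega),
    List.getElem_reverse,
    List.getD_eq_getElem _ 0 (by rw [hrl]; omega)]
  congr 1
  omega

theorem pvRows'_length (matrix : List (List Int)) (ziel : Int) :
    ((pvV matrix ziel).reverse.map List.reverse).length = matrix.length := by
  simp [pvV_length]

theorem pvRows'_rowlen (matrix : List (List Int)) (ziel : Int) :
    ∀ r ∈ (pvV matrix ziel).reverse.map List.reverse, r.length = pvWn matrix := by
  intro r hr
  obtain ⟨r', hr', rfl⟩ := List.mem_map.mp hr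
  rw [List.length_reverse]
  exact pvV_rowlen matrix ziel r' (List.mem_reverse.mp hr')

theorem pvRows'_le (matrix : List (List Int)) (ziel : Int) :
    ∀ r ∈ (pvV matrix ziel).reverse.map List.reverse, ∀ b : Nat, b < pvWn matrix →
      r.getD b 0 ≤ pvINF matrix := by
  intro r hr b hb
  obtain ⟨a, ha, hra⟩ := List.mem_iff_getElem.mp hr
  have hout : ((pvV matrix ziel).reverse.map List.reverse).getD a [] = r := by
    rw [List.getD_eq_getElem ((pvV matrix ziel).reverse.map List.reverse) [] (by simpa using ha)]
    exact hra
  have haR : a < matrix.length := by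
    have := pvRows'_length matrix ziel; omega
  have heq : r.getD b 0 = pvAt ((pvV matrix ziel).reverse.map List.reverse) a b := by
    unfold pvAt; rw [hout]
  rw [heq, pvAtRevMap (pvV matrix ziel) (pvWn matrix) (pvV_rowlen matrix ziel) a b
    (by rw [pvV_length]; omega) hb]
  rw [pvV_length]
  exact pvV_le matrix ziel _ (by omega) _ (by omega)

theorem pvE_isMin (matrix : List (List Int)) (ziel : Int) :
    ∀ i : Nat, i < matrix.length → ∀ j : Nat, j < pvWn matrix →
    pvIsMin (pvAt (pvE matrix ziel) i j)
      (fun x => ∃ a b : Nat, a < matrix.length ∧ b < pvWn matrix ∧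
        x = pvG matrix ziel a b + pvManh ((i:Int), (j:Int)) ((a:Int), (b:Int))) := by
  intro i hi j hj
  have hBklen : (pvBk matrix ziel).length = matrix.length := by
    rw [pvBk, pvFRows_length, pvRows'_length]
  have hBkrow : ∀ r ∈ pvBk matrix ziel, r.length = pvWn matrix :=
    pvFRows_row_length _ _ _ _ (by simp) (pvRows'_rowlen matrix ziel)
  have hat : pvAt (pvE matrix ziel) i j
      = pvAt (pvBk matrix ziel) (matrix.length - 1 - i) (pvWn matrix - 1 - j) := by
    rw [pvE, pvAtRevMap (pvBk matrix ziel) (pvWn matrix) hBkrow i j (by omega) hj, hBklen]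
  have hBk := pvClean (pvINF matrix) (pvWn matrix) ((pvV matrix ziel).reverse.map List.reverse)
    (pvRows'_rowlen matrix ziel) (pvRows'_le matrix ziel)
    (matrix.length - 1 - i) (by rw [pvRows'_length]; omega) (pvWn matrix - 1 - j) (by omega)
  rw [hat]
  unfold pvBk
  refine pvIsMin_trans hBk ?_ ?_
  · rintro x ⟨a, b, ha, hb, rfl⟩
    have haR : a < matrix.length := by omega
    have hbW : b < pvWn matrix := by omega
    have hx : pvAt ((pvV matrix ziel).reverse.map List.reverse) a b
        = pvAt (pvV matrix ziel) (matrix.length - 1 - a) (pvWn matrix - 1 - b) := by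
      rw [pvAtRevMap (pvV matrix ziel) (pvWn matrix) (pvV_rowlen matrix ziel) a b
        (by rw [pvV_length]; omega) hbW, pvV_length]
    obtain ⟨p, q, hpu, hqv, hval⟩ :=
      (pvV_isMin matrix ziel (matrix.length - 1 - a) (by omega) (pvWn matrix - 1 - b) (by omega)).1
    refine ⟨pvG matrix ziel p q + pvManh ((i:Int), (j:Int)) ((p:Int), (q:Int)),
      ⟨p, q, by omega, by omega, rfl⟩, ?_⟩
    rw [hx, hval]
    simp only [pvManh]
    omega
  · rintro y ⟨p, q, hp, hq, rfl⟩
    have huR : max i p < matrix.length := by omega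
    have hvW : max j q < pvWn matrix := by omega
    have h1 := hBk.2 (pvAt ((pvV matrix ziel).reverse.map List.reverse)
        (matrix.length - 1 - max i p) (pvWn matrix - 1 - max j q)
        + (((matrix.length - 1 - i : Nat) : Int) - ((matrix.length - 1 - max i p : Nat) : Int))
        + (((pvWn matrix - 1 - j : Nat) : Int) - ((pvWn matrix - 1 - max j q : Nat) : Int)))
      ⟨matrix.length - 1 - max i p, pvWn matrix - 1 - max j q, by omega, by omega, rfl⟩
    have hx : pvAt ((pvV matrix ziel).reverse.map List.reverse)
        (matrix.length - 1 - max i p) (pvWn matrix - 1 - max j q)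
        = pvAt (pvV matrix ziel) (max i p) (max j q) := by
      rw [pvAtRevMap (pvV matrix ziel) (pvWn matrix) (pvV_rowlen matrix ziel) _ _
        (by rw [pvV_length]; omega) (by omega), pvV_length]
      congr 1 <;> omega
    rw [hx] at h1
    have h2 := (pvV_isMin matrix ziel (max i p) huR (max j q) hvW).2
      (pvG matrix ziel p q + (((max i p : Nat) : Int) - p) + (((max j q : Nat) : Int) - q))
      ⟨p, q, by omega, by omega, rfl⟩
    simp only [pvManh]
    omega

theorem pvMem_cells (matrix : List (List Int)) (c : (Int × Int) × Int) :
    c ∈ pvCells matrix ↔ ∃ (a b : Nat) (ha : a < matrix.length)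
      (hb : b < (matrix[a]'ha).length), c = (((a:Int), (b:Int)), (matrix[a]'ha)[b]'hb) := by
  unfold pvCells
  constructor
  · intro h
    obtain ⟨p, hp, hc⟩ := List.mem_flatMap.mp h
    obtain ⟨a, ha, rfl⟩ := (PySem.List.mem_enumerate_iff _ _ _).mp hp
    obtain ⟨q, hq, rfl⟩ := List.mem_map.mp hc
    obtain ⟨b, hb, rfl⟩ := (PySem.List.mem_enumerate_iff _ _ _).mp hq
    exact ⟨a, b, ha, hb, by simp⟩
  · rintro ⟨a, b, ha, hb, rfl⟩
    refine List.mem_flatMap.mpr ⟨((0:Int) + (a:Int), matrix[a]'ha),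
      (PySem.List.mem_enumerate_iff _ _ _).mpr ⟨a, ha, rfl⟩,
      List.mem_map.mpr ⟨((0:Int) + (b:Int), (matrix[a]'ha)[b]'hb),
        (PySem.List.mem_enumerate_iff _ _ _).mpr ⟨b, hb, rfl⟩, by simp⟩⟩

theorem pvMem_targets (matrix : List (List Int)) (ziel : Int) (t : Int × Int) :
    t ∈ pvTargets matrix ziel ↔ ∃ (a b : Nat) (ha : a < matrix.length)
      (hb : b < (matrix[a]'ha).length), t = ((a:Int), (b:Int)) ∧ (matrix[a]'ha)[b]'hb = ziel := by
  unfold pvTargets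
  constructor
  · intro h
    obtain ⟨c, hcf, rfl⟩ := List.mem_map.mp h
    have hc := List.mem_filter.mp hcf
    obtain ⟨a, b, ha, hb, rfl⟩ := (pvMem_cells matrix c).mp hc.1
    exact ⟨a, b, ha, hb, rfl, by simpa using hc.2⟩
  · rintro ⟨a, b, ha, hb, rfl, hv⟩
    exact List.mem_map.mpr ⟨(((a:Int), (b:Int)), (matrix[a]'ha)[b]'hb),
      List.mem_filter.mpr ⟨(pvMem_cells matrix _).mpr ⟨a, b, ha, hb, rfl⟩, by simpa using hv⟩, rfl⟩

theorem pvG_cases (matrix : List (List Int)) (ziel : Int) (a b : Nat) :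
    pvG matrix ziel a b = 0 ∨ pvG matrix ziel a b = pvINF matrix := by
  unfold pvG
  cases matrix[a]?.bind (fun r => r[b]?) with
  | none => exact Or.inr rfl
  | some x =>
    by_cases h : x = ziel
    · exact Or.inl (by simp [h])
    · exact Or.inr (by simp [h])

theorem pvG_eq_zero_iff (matrix : List (List Int)) (ziel : Int) (a b : Nat)
    (ha : a < matrix.length) :
    (pvG matrix ziel a b = 0 ↔ ((a:Int), (b:Int)) ∈ pvTargets matrix ziel) := by
  have hInf := pvINF_pos matrix
  unfold pvG
  rw [List.getElem?_eq_getElem ha]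
  simp only [Option.bind_some]
  by_cases hbl : b < (matrix[a]'ha).length
  · rw [List.getElem?_eq_getElem hbl]
    by_cases hxz : (matrix[a]'ha)[b]'hbl = ziel
    · simp only [hxz, if_true]
      exact ⟨fun _ => (pvMem_targets matrix ziel _).mpr ⟨a, b, ha, hbl, rfl, hxz⟩, fun _ => trivial⟩
    · simp only [if_neg hxz]
      constructor
      · intro h; exact absurd h (ne_of_gt hInf)
      · intro htm
        obtain ⟨p, q, hp, hq, heq, hv⟩ := (pvMem_targets matrix ziel _).mp htm
        rw [Prod.mk.injEq] at heq
        have hpa : a = p := by exact_mod_cast heq.1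
        have hqb : b = q := by exact_mod_cast heq.2
        subst hpa; subst hqb
        exact absurd hv hxz
  · rw [List.getElem?_eq_none (by omega)]
    constructor
    · intro h; exact absurd h (ne_of_gt hInf)
    · intro htm
      obtain ⟨p, q, hp, hq, heq, hv⟩ := (pvMem_targets matrix ziel _).mp htm
      rw [Prod.mk.injEq] at heq
      have hpa : a = p := by exact_mod_cast heq.1
      have hqb : b = q := by exact_mod_cast heq.2
      subst hpa; subst hqb
      exact absurd hq hbl

theorem pvDist_eq (matrix : List (List Int)) (ziel : Int)
    (hT : pvTargets matrix ziel ≠ []) :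
    ∀ i : Nat, i < matrix.length → ∀ j : Nat, j < pvWn matrix →
    pvAt (pvE matrix ziel) i j = pvMval (pvTargets matrix ziel) ((i:Int), (j:Int)) := by
  intro i hi j hj
  have hE := pvE_isMin matrix ziel i hi j hj
  have hM := pvMval_isMin (pvTargets matrix ziel) hT ((i:Int), (j:Int))
  refine pvIsMin_unique (pvIsMin_trans hE ?_ ?_) hM
  · rintro x ⟨a, b, ha, hb, rfl⟩
    rcases pvG_cases matrix ziel a b with hz | hz
    · refine ⟨pvManh ((i:Int), (j:Int)) ((a:Int), (b:Int)),
        ⟨((a:Int), (b:Int)), (pvG_eq_zero_iff matrix ziel a b ha).mp hz, rfl⟩, ?_⟩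
      rw [hz, zero_add]
    · obtain ⟨t0, ht0⟩ := List.exists_mem_of_ne_nil _ hT
      obtain ⟨p, q, hp, hq, rfl, hv⟩ := (pvMem_targets matrix ziel t0).mp ht0
      have hqW : q < pvWn matrix := lt_of_lt_of_le hq (pvRowLe matrix _ (List.getElem_mem _))
      refine ⟨pvManh ((i:Int), (j:Int)) ((p:Int), (q:Int)), ⟨_, ht0, rfl⟩, ?_⟩
      rw [hz]
      simp only [pvManh, pvINF]
      omega
  · rintro y ⟨t, ht, rfl⟩
    obtain ⟨p, q, hp, hq, rfl, hv⟩ := (pvMem_targets matrix ziel t).mp ht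
    have hqW : q < pvWn matrix := lt_of_lt_of_le hq (pvRowLe matrix _ (List.getElem_mem _))
    have h := hE.2 (pvG matrix ziel p q + pvManh ((i:Int), (j:Int)) ((p:Int), (q:Int)))
      ⟨p, q, hp, hqW, rfl⟩
    rw [(pvG_eq_zero_iff matrix ziel p q hp).mpr ht, zero_add] at h
    exact h


-- ===== assembling port B =====

theorem pvFoldFlat {σ α β : Type} (g : α → List β) (f : σ → β → σ) (l : List α) (s : σ) :
    l.foldl (fun s a => (g a).foldl f s) s = (l.flatMap g).foldl f s := by
  induction l generalizing s with
  | nil => rfl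
  | cons a l ih => simp [List.foldl_append, ih]

theorem pvFlatMapFlatten {α β : Type} (g : α → List β) (l : List α) :
    l.flatMap g = (l.map g).flatten := by
  induction l with
  | nil => rfl
  | cons a l ih => simp [ih]

theorem pvFlatMapCongr {α₁ α₂ β : Type} (l₁ : List α₁) (l₂ : List α₂)
    (g₁ : α₁ → List β) (g₂ : α₂ → List β) (h : l₁.map g₁ = l₂.map g₂) :
    l₁.flatMap g₁ = l₂.flatMap g₂ := by
  rw [pvFlatMapFlatten, pvFlatMapFlatten, h]

def pvFStep (ziel : Int) (b : Bool) (q : Int × Int) : Bool := if q.1 = ziel then true else b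
def pvDStep (ziel : Int) (d : PySem.Dict Int Int) (q : Int × Int) : PySem.Dict Int Int :=
  if q.1 = ziel then d
  else if q.1 ≠ 0 then
    match d.get? q.1 with
    | none => d.insert q.1 q.2
    | some cur => if q.2 < cur then d.insert q.1 q.2 else d
  else d

theorem pvFlagFold (ziel : Int) (l : List (Int × Int)) (b : Bool) :
    l.foldl (pvFStep ziel) b = (b || l.any (fun q => decide (q.1 = ziel))) := by
  induction l generalizing b with
  | nil => simp
  | cons q l ih =>
    simp only [List.foldl_cons, List.any_cons, ih]
    unfold pvFStep
    split_ifs with h <;> simp [h]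

theorem pvFoldRowsRev (INF : Int) (rows : List (List Int)) (prev : List Int)
    (acc : List (List Int)) :
    (rows.foldl (fun (st : List Int × List (List Int)) zeile =>
      let z := pvDurchlauf st.1 ((PySem.List.slice? zeile none none (-1)).getD []) INF
      (z, st.2 ++ [z])) (prev, acc)).2 = acc ++ pvFRows INF prev (rows.map List.reverse) := by
  induction rows generalizing prev acc with
  | nil => simp [pvFRows]
  | cons r rs ih =>
    rw [List.foldl_cons]
    refine (ih _ _).trans ?_
    simp [pvFRows, pvDurchlauf_eq, PySem.List.slice?_none_none_neg_one]

theorem pvE_length (matrix : List (List Int)) (ziel : Int) :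
    (pvE matrix ziel).length = matrix.length := by
  rw [pvE]
  simp [pvBk, pvFRows_length, pvV_length]

theorem pvE_rowlen (matrix : List (List Int)) (ziel : Int) :
    ∀ r ∈ pvE matrix ziel, r.length = pvWn matrix := by
  intro r hr
  obtain ⟨r', hr', rfl⟩ := List.mem_map.mp hr
  rw [List.length_reverse]
  exact pvFRows_row_length _ _ _ _ (by simp) (pvRows'_rowlen matrix ziel) r'
    (List.mem_reverse.mp hr')

theorem pvCellsSnd (matrix : List (List Int)) :
    (pvCells matrix).map (fun c => c.2) = matrix.flatten := by
  unfold pvCells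
  rw [List.map_flatMap]
  have h : ∀ p : Int × List Int,
      (((PySem.List.enumerate p.2 0).map (fun q => ((p.1, q.1), q.2))).map (fun c => c.2))
        = p.2 := by
    intro p
    rw [List.map_map]
    exact PySem.List.map_snd_enumerate p.2 0
  calc (PySem.List.enumerate matrix 0).flatMap
        (fun p => ((PySem.List.enumerate p.2 0).map (fun q => ((p.1, q.1), q.2))).map (fun c => c.2))
      = (PySem.List.enumerate matrix 0).flatMap (fun p => p.2) := by
        apply pvFlatMapCongr
        apply List.map_congr_left
        intro p _
        exact h p
    _ = matrix.flatten := by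
        rw [pvFlatMapFlatten, PySem.List.map_snd_enumerate]

theorem pvTargets_nil_iff (matrix : List (List Int)) (ziel : Int) :
    pvTargets matrix ziel = [] ↔ (∀ x ∈ matrix.flatten, x ≠ ziel) := by
  unfold pvTargets
  rw [List.map_eq_nil_iff, List.filter_eq_nil_iff]
  constructor
  · intro h x hx
    obtain ⟨c, hc, rfl⟩ := List.mem_map.mp (pvCellsSnd matrix ▸ hx : x ∈ (pvCells matrix).map (fun c => c.2))
    exact by simpa using h c hc
  · intro h c hc
    have : c.2 ∈ matrix.flatten := pvCellsSnd matrix ▸ List.mem_map_of_mem hc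
    simpa using h c.2 this

-- the zipped cell list of B, when targets exist
theorem pvZCells (matrix : List (List Int)) (ziel : Int) (hT : pvTargets matrix ziel ≠ []) :
    (matrix.zip (pvE matrix ziel)).flatMap (fun pz => pz.1.zip pz.2)
      = (pvCells matrix).map (fun c => (c.2, pvMval (pvTargets matrix ziel) c.1)) := by
  unfold pvCells
  rw [List.map_flatMap]
  apply pvFlatMapCongr
  apply List.ext_getElem
  · simp [pvE_length, PySem.List.length_enumerate]
  intro i hi1 hi2
  have hiR : i < matrix.length := by simpa [PySem.List.length_enumerate] using hi2
  simp only [List.getElem_map, List.getElem_zip, PySem.List.getElem_enumerate]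
  rw [List.map_map]
  apply List.ext_getElem
  · have hElen : ((pvE matrix ziel)[i]'(by rw [pvE_length]; omega)).length = pvWn matrix :=
      pvE_rowlen matrix ziel _ (List.getElem_mem _)
    have hle := pvRowLe matrix (matrix[i]'hiR) (List.getElem_mem _)
    simp only [List.length_zip, List.length_map, PySem.List.length_enumerate, hElen]
    omega
  intro b hb1 hb2
  have hbrow : b < (matrix[i]'hiR).length := by
    simpa [PySem.List.length_enumerate] using hb2
  have hbW : b < pvWn matrix :=
    lt_of_lt_of_le hbrow (pvRowLe matrix _ (List.getElem_mem _))
  simp only [List.getElem_zip, List.getElem_map, PySem.List.getElem_enumerate, Function.comp]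
  have hEib : ((pvE matrix ziel)[i]'(by rw [pvE_length]; omega))[b]'(by
      rw [pvE_rowlen matrix ziel _ (List.getElem_mem _)]; omega)
      = pvAt (pvE matrix ziel) i b := by
    unfold pvAt
    rw [List.getD_eq_getElem (pvE matrix ziel) [] (by rw [pvE_length]; omega),
      List.getD_eq_getElem _ 0 (by rw [pvE_rowlen matrix ziel _ (List.getElem_mem _)]; omega)]
  rw [hEib, pvDist_eq matrix ziel hT i hiR b hbW]
  simp

theorem pvZFst (matrix : List (List Int)) (ziel : Int) :
    ((matrix.zip (pvE matrix ziel)).flatMap (fun pz => pz.1.zip pz.2)).map (fun q => q.1)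
      = matrix.flatten := by
  rw [List.map_flatMap, pvFlatMapFlatten]
  have hmap : (matrix.zip (pvE matrix ziel)).map (fun pz => (pz.1.zip pz.2).map (fun q => q.1))
      = matrix := by
    apply List.ext_getElem
    · simp [pvE_length]
    intro i hi1 hi2
    have hiR : i < matrix.length := by simpa using hi2
    simp only [List.getElem_map, List.getElem_zip]
    apply List.map_fst_zip
    rw [pvE_rowlen matrix ziel _ (List.getElem_mem _)]
    exact pvRowLe matrix _ (List.getElem_mem _)
  rw [hmap]

theorem pvB_eq (matrix : List (List Int)) (ziel : Int) :
    finde_alle_zahlenpaare_alt matrix ziel =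
      if pvTargets matrix ziel = [] then none
      else if (pvDictB2 matrix ziel).items = [] then none
      else some ((PySem.List.sorted (pvDictB2 matrix ziel).items (fun x => x.2) false).map
        (fun p => p.1)) := by
  have hg : matrix.map (fun zeile => zeile.map (fun x => if x = ziel then 0 else pvINF matrix)
      ++ List.replicate ((pvWn matrix : Int) - (zeile.length : Int)).toNat (pvINF matrix))
      = pvGitter matrix ziel := by
    apply List.map_congr_left
    intro z hz
    have hle := pvRowLe matrix z hz
    have hcnt : ((pvWn matrix : Int) - (z.length : Int)).toNat = pvWn matrix - z.length := by
      omega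
    rw [hcnt]
  simp only [finde_alle_zahlenpaare_alt]
  rw [pvBreite_eq]
  simp only [PySem.List.len_eq]
  rw [show ((matrix.length : Int) + (pvWn matrix : Int) + 1) = pvINF matrix from rfl]
  simp only [Int.toNat_natCast]
  rw [hg]
  rw [pvFoldRows (pvINF matrix) (pvGitter matrix ziel)
    (List.replicate (pvWn matrix) (pvINF matrix)) [], List.nil_append]
  rw [show pvFRows (pvINF matrix) (List.replicate (pvWn matrix) (pvINF matrix))
    (pvGitter matrix ziel) = pvV matrix ziel from rfl]
  rw [pvFoldRowsRev (pvINF matrix) (pvV matrix ziel).reverse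
    (List.replicate (pvWn matrix) (pvINF matrix)) [], List.nil_append]
  rw [show pvFRows (pvINF matrix) (List.replicate (pvWn matrix) (pvINF matrix))
    ((pvV matrix ziel).reverse.map List.reverse) = pvBk matrix ziel from rfl]
  simp only [PySem.List.slice?_none_none_neg_one, Option.getD_some]
  rw [show (pvBk matrix ziel).reverse.map (fun z => z.reverse) = pvE matrix ziel from rfl]
  rw [pvFoldFlat (fun pz : List Int × List Int => pz.1.zip pz.2)
      (fun (sq : Bool × PySem.Dict Int Int) (q : Int × Int) =>
        if q.1 = ziel then (true, sq.2)
        else if q.1 ≠ 0 then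
          match sq.2.get? q.1 with
          | none => (sq.1, sq.2.insert q.1 q.2)
          | some cur => if q.2 < cur then (sq.1, sq.2.insert q.1 q.2) else sq
        else sq)]
  have hsp := PySem.List.foldl_congr_mem
    ((matrix.zip (pvE matrix ziel)).flatMap (fun pz => pz.1.zip pz.2))
    (fun (sq : Bool × PySem.Dict Int Int) (q : Int × Int) =>
        if q.1 = ziel then (true, sq.2)
        else if q.1 ≠ 0 then
          match sq.2.get? q.1 with
          | none => (sq.1, sq.2.insert q.1 q.2)
          | some cur => if q.2 < cur then (sq.1, sq.2.insert q.1 q.2) else sq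
        else sq)
    (fun (sq : Bool × PySem.Dict Int Int) (q : Int × Int) =>
        (pvFStep ziel sq.1 q, pvDStep ziel sq.2 q))
    (false, PySem.Dict.empty) ?_
  · rw [hsp, PySem.List.foldl_prod_mk (f := pvFStep ziel) (g := pvDStep ziel)]
    by_cases hT : pvTargets matrix ziel = []
    · have hflag : ((matrix.zip (pvE matrix ziel)).flatMap
          (fun pz => pz.1.zip pz.2)).foldl (pvFStep ziel) false = false := by
        rw [pvFlagFold]
        simp only [Bool.false_or]
        apply List.any_eq_false.mpr
        intro q hq
        have hq1 : q.1 ∈ matrix.flatten := by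
          rw [← pvZFst matrix ziel]
          exact List.mem_map_of_mem hq
        simpa using (pvTargets_nil_iff matrix ziel).mp hT q.1 hq1
      simp [hflag, hT]
    · have hflag : ((matrix.zip (pvE matrix ziel)).flatMap
          (fun pz => pz.1.zip pz.2)).foldl (pvFStep ziel) false = true := by
        rw [pvFlagFold]
        simp only [Bool.false_or]
        apply List.any_eq_true.mpr
        obtain ⟨t0, ht0⟩ := List.exists_mem_of_ne_nil _ hT
        obtain ⟨a, b, ha, hb, rfl, hv⟩ := (pvMem_targets matrix ziel t0).mp ht0
        have hfl : ((matrix[a]'ha)[b]'hb) ∈ matrix.flatten :=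
          List.mem_flatten.mpr ⟨matrix[a]'ha, List.getElem_mem _, List.getElem_mem _⟩
        rw [← pvZFst matrix ziel] at hfl
        obtain ⟨q, hq, hq1⟩ := List.mem_map.mp hfl
        exact ⟨q, hq, by simp [hq1, hv]⟩
      have hdict : ((matrix.zip (pvE matrix ziel)).flatMap
          (fun pz => pz.1.zip pz.2)).foldl (pvDStep ziel) PySem.Dict.empty
          = pvDictB2 matrix ziel := by
        rw [pvZCells matrix ziel hT, List.foldl_map]
        unfold pvDictB2
        apply PySem.List.foldl_congr_mem
        intro acc c _
        unfold pvDStep pvGB2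
        by_cases h1 : c.2 = ziel
        · simp [h1]
        · by_cases h2 : c.2 = 0
          · simp [h1, h2]
          · simp only [if_neg h1, ne_eq, h2, not_false_eq_true, if_pos,
              show (c.2 ≠ ziel ∧ c.2 ≠ 0) from ⟨h1, h2⟩, and_self]
            simp [h1, h2]
      simp [hflag, hdict, hT]
  · intro acc q _
    simp only
    by_cases h1 : q.1 = ziel
    · simp [pvFStep, pvDStep, h1]
    · by_cases h2 : q.1 = 0
      · have h1' : ¬ (0:Int) = ziel := h2 ▸ h1
        simp [pvFStep, pvDStep, h1', h2]
      · simp only [pvFStep, pvDStep, if_neg h1, ne_eq, h2, not_false_eq_true, if_pos]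
        cases acc.2.get? q.1 with
        | none => rfl
        | some cur =>
          by_cases h3 : q.2 < cur
          · simp [h3]
          · simp [h3]

-- ===== VERDICT (by name: the statement is the Claim_ definition above) =====
theorem finde_alle_zahlenpaare_spec : Claim_equal_finde_alle_zahlenpaare := by
  intro matrix ziel _
  unfold Spec_finde_alle_zahlenpaare
  rw [pvA_eq, pvB_eq]
  by_cases hT : pvTargets matrix ziel = []
  · simp [hT]
  · obtain ⟨hnd, hne, hrel⟩ := pvInvFold2 (pvTargets matrix ziel) ziel (pvCells matrix)
      PySem.Dict.empty PySem.Dict.empty PySem.Dict.nodup_keys_empty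
      (by simp [PySem.Dict.empty]) (by simp [PySem.Dict.empty])
    have hrel' : (pvDictB2 matrix ziel).items
        = (pvDictA matrix ziel).items.map (fun p => (p.1, pvBmin (pvTargets matrix ziel) p.2)) :=
      hrel
    by_cases hA : (pvDictA matrix ziel).items = []
    · simp [hT, hA, hrel']
    · have hB : (pvDictB2 matrix ziel).items ≠ [] := by simp [hrel', hA]
      rw [if_neg (by simp [hT, hA]), if_neg hT, if_neg hB]
      have hmap : (pvDictA matrix ziel).items.map
            (fun pz => (pz.1, (pvStepFold (pvTargets matrix ziel) pz.2).getD 0))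
          = (pvDictB2 matrix ziel).items := by
        rw [hrel']
        apply List.map_congr_left
        intro p hp
        rw [pvStepFold_eq _ _ hT (hne p hp)]
        rfl
      rw [hmap]
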